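-- pv_equiv track=rewrite | github.com/jp31415926/joke-submission-pipeline | joke-extractor/parsers/parser_witandwisdom.py | _fold_lines
-- ===== SOURCE A (Python) =====
-- def _fold_lines(raw_lines):
--   """Fold line-wrapped text into paragraphs separated by blank lines.
--
--   Consecutive non-blank lines are joined with spaces. Multiple blank lines
--   between paragraphs are collapsed to one.
--   """
--   paragraphs = []
--   current_para = []
--
--   for line in raw_lines:
--     stripped = line.strip()
--     if stripped:
--       current_para.append(stripped)
--     else:
--       if current_para:
--         paragraphs.append(" ".join(current_para))
--         current_para = []
--
--   if current_para:
--     paragraphs.append(" ".join(current_para))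
--
--   return "\n\n".join(paragraphs)
-- ===== SOURCE B (Python) =====
-- def _fold_lines(raw_lines):
--   """Partition-then-map: strip all lines once, scan for runs of non-blank
--   lines with two indices, join each run into a paragraph."""
--   stripped = [line.strip() for line in raw_lines]
--   paragraphs = []
--   n = len(stripped)
--   i = 0
--   while i < n:
--     if not stripped[i]:
--       i += 1
--       continue
--     j = i
--     while j < n and stripped[j]:
--       j += 1
--     paragraphs.append(" ".join(stripped[i:j]))
--     i = j
--   return "\n\n".join(paragraphs)
-- ===== Notes on version B (the rewrite author's own statement) =====
-- stated objective: alternative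
-- what changed: Replaces A's flush-a-running-buffer accumulator loop with a partition-then-map scheme: strip all lines once, scan for maximal runs of non-blank lines with two indices, and join each run into a paragraph.
import Mathlib
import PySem

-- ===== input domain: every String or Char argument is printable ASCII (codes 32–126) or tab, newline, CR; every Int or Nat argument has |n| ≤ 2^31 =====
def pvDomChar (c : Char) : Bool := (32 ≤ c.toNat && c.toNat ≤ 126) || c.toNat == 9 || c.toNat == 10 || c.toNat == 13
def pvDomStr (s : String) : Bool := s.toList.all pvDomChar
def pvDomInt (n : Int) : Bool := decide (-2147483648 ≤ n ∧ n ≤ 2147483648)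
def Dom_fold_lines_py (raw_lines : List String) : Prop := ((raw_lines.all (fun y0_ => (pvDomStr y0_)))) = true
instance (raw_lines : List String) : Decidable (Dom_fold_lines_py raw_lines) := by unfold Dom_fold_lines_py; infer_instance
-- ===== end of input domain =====

-- B replaces A's flush-a-running-buffer loop with strip-all, then scan runs of non-blank lines (alternative decomposition, same cost).

-- ===== PORT A =====
def foldStepA (acc : List String × List String) (line : String) : List String × List String :=
  let stripped := PySem.Str.strip line
  if stripped ≠ "" then (acc.1, acc.2 ++ [stripped])
  else if acc.2 ≠ [] then (acc.1 ++ [PySem.Str.join " " acc.2], ([] : List String))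
  else acc

def fold_lines_py (raw_lines : List String) : String :=
  let st := raw_lines.foldl foldStepA ([], [])
  let paragraphs := if st.2 ≠ [] then st.1 ++ [PySem.Str.join " " st.2] else st.1
  PySem.Str.join "\n\n" paragraphs

-- ===== PORT B =====
-- the two-index run scan of Source B: skip a blank, otherwise take the maximal non-blank run
def pvRuns : List String → List (List String)
  | [] => []
  | s :: rest =>
    if s = "" then pvRuns rest
    else (s :: rest.takeWhile (fun t => t ≠ "")) :: pvRuns (rest.dropWhile (fun t => t ≠ ""))
termination_by l => l.length
decreasing_by
  · simp
  · have := List.length_dropWhile_le (fun t => decide (t ≠ "")) rest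
    simp only [List.length_cons]
    omega

def fold_lines_py_alt (raw_lines : List String) : String :=
  let stripped := raw_lines.map PySem.Str.strip
  PySem.Str.join "\n\n" ((pvRuns stripped).map (PySem.Str.join " "))

-- ===== PRECONDITION & SPEC =====
def Spec_fold_lines_py (raw_lines : List String) (out : String) : Prop := out = fold_lines_py_alt raw_lines
instance (raw_lines : List String) (out : String) : Decidable (Spec_fold_lines_py raw_lines out) := by unfold Spec_fold_lines_py; infer_instance

-- ===== CLAIM (what is proved, stated in full; the proofs are below) =====
def Claim_equal_fold_lines_py : Prop := ∀ (raw_lines : List String), Dom_fold_lines_py raw_lines → Spec_fold_lines_py raw_lines (fold_lines_py raw_lines)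

-- ===== LEMMAS AND PROOFS =====
-- A's step on an already-stripped line
def stepS (acc : List String × List String) (s : String) : List String × List String :=
  if s ≠ "" then (acc.1, acc.2 ++ [s])
  else if acc.2 ≠ [] then (acc.1 ++ [PySem.Str.join " " acc.2], ([] : List String))
  else acc

-- run scanner carrying A's pending buffer
def pvRunsC (cur : List String) : List String → List (List String)
  | [] => if cur = [] then [] else [cur]
  | s :: l => if s = "" then (if cur = [] then pvRunsC [] l else cur :: pvRunsC [] l)
              else pvRunsC (cur ++ [s]) l

lemma pvRunsC_spec (l : List String) :
    (∀ cur : List String, cur ≠ [] →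
      pvRunsC cur l = (cur ++ l.takeWhile (fun t => t ≠ "")) :: pvRuns (l.dropWhile (fun t => t ≠ ""))) ∧
    pvRunsC [] l = pvRuns l := by
  induction l with
  | nil =>
    constructor
    · intro cur hcur; simp [pvRunsC, pvRuns, hcur]
    · simp [pvRunsC, pvRuns]
  | cons s l ih =>
    constructor
    · intro cur hcur
      by_cases hs : s = ""
      · subst hs
        simp [pvRunsC, hcur, ih.2, pvRuns]
      · simp only [pvRunsC, if_neg hs]
        rw [ih.1 (cur ++ [s]) (by simp)]
        simp [hs]
    · by_cases hs : s = ""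
      · subst hs; simp [pvRunsC, pvRuns, ih.2]
      · simp only [pvRunsC, if_neg hs, List.nil_append]
        rw [ih.1 [s] (by simp)]
        rw [pvRuns]
        simp [hs]

lemma foldS_eq (l : List String) (ps cur : List String) :
    (if (l.foldl stepS (ps, cur)).2 ≠ [] then
        (l.foldl stepS (ps, cur)).1 ++ [PySem.Str.join " " (l.foldl stepS (ps, cur)).2]
      else (l.foldl stepS (ps, cur)).1)
    = ps ++ (pvRunsC cur l).map (PySem.Str.join " ") := by
  induction l generalizing ps cur with
  | nil =>
    by_cases h : cur = []
    · subst h; simp [pvRunsC]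
    · simp [pvRunsC, h]
  | cons s l ih =>
    by_cases hs : s = ""
    · subst hs
      by_cases hc : cur = []
      · subst hc
        have h1 : stepS (ps, []) "" = (ps, []) := by simp [stepS]
        rw [List.foldl_cons, h1, ih]
        simp [pvRunsC]
      · have h1 : stepS (ps, cur) "" = (ps ++ [PySem.Str.join " " cur], []) := by
          simp [stepS, hc]
        rw [List.foldl_cons, h1, ih]
        simp [pvRunsC, hc]
    · simp only [List.foldl_cons, stepS, if_pos hs, pvRunsC, if_neg hs]
      rw [ih]

-- ===== VERDICT (by name: the statement is the Claim_ definition above) =====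
theorem fold_lines_py_spec : Claim_equal_fold_lines_py := by
  intro raw_lines _
  unfold Spec_fold_lines_py fold_lines_py fold_lines_py_alt
  simp only []
  have hmap : raw_lines.foldl foldStepA ([], []) =
      (raw_lines.map PySem.Str.strip).foldl stepS ([], []) := by
    rw [List.foldl_map]
    rfl
  rw [hmap]
  have := foldS_eq (raw_lines.map PySem.Str.strip) [] []
  rw [this, (pvRunsC_spec (raw_lines.map PySem.Str.strip)).2]
  simp
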